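-- pv_equiv track=rewrite | github.com/ahill6/TransferPoint | schoolMacSave/Fault Localization/faultLocTest.py | counter_subset
-- ===== SOURCE A (Python) =====
-- from collections import Counter
--
-- def counter_subset(list1, list2):
--     c1, c2 = Counter(list1), Counter(list2)
--     for k, n in c1.items():
--         if n < c2[k]:
--             return False
--     for k, n in c2.items():
--         if n > c1[k]:
--             return False
--     return True
-- ===== SOURCE B (Python) =====
-- from collections import Counter
--
-- def counter_subset(list1, list2):
--     budget = Counter(list1)  # private copy; caller's data untouched
--     for x in list2:
--         if budget[x] <= 0:
--             return False
--         budget[x] -= 1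
--     return True
-- ===== Notes on version B (the rewrite author's own statement) =====
-- stated objective: alternative
-- what changed: Instead of building two Counters and comparing them with two loops over their items, B builds one counter of list1 only and scans the raw list2 once, greedily consuming one unit of budget per element and failing as soon as an element's budget is exhausted.
import Mathlib
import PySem

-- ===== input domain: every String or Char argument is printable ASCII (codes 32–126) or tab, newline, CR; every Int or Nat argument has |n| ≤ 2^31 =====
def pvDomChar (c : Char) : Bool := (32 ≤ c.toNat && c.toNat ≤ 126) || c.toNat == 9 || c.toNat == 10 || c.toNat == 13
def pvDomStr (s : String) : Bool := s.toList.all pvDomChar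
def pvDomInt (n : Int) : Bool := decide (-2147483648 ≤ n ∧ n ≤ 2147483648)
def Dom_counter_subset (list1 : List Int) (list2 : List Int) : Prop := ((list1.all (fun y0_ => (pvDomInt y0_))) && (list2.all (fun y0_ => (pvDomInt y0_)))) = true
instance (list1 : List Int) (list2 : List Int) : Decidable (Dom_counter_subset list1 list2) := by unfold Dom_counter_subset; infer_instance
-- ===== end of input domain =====

-- B replaces A's two item-loops over two Counters by a single counter of list1
-- consumed greedily while scanning list2 directly; same return value everywhere.

-- ===== PORT A =====
def counter_subset (list1 : List Int) (list2 : List Int) : Bool :=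
  let c1 := PySem.Dict.counter list1
  let c2 := PySem.Dict.counter list2
  -- 'for k, n in c1.items(): if n < c2[k]: return False' = early-return loop = any
  if c1.items.any (fun kn => decide (kn.2 < c2.getD kn.1 0)) then false
  else if c2.items.any (fun kn => decide (kn.2 > c1.getD kn.1 0)) then false
  else true

-- ===== PORT B =====
-- 'for x in list2: if budget[x] <= 0: return False; budget[x] -= 1'
def csAltGo (budget : PySem.Dict Int Int) : List Int → Bool
  | [] => true
  | x :: xs =>
    if budget.getD x 0 ≤ 0 then false
    else csAltGo (budget.insert x (budget.getD x 0 - 1)) xs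

def counter_subset_alt (list1 : List Int) (list2 : List Int) : Bool :=
  csAltGo (PySem.Dict.counter list1) list2

-- ===== PRECONDITION & SPEC =====
def Spec_counter_subset (list1 : List Int) (list2 : List Int) (out : Bool) : Prop := out = counter_subset_alt list1 list2
instance (list1 : List Int) (list2 : List Int) (out : Bool) : Decidable (Spec_counter_subset list1 list2 out) := by unfold Spec_counter_subset; infer_instance

-- ===== CLAIM (what is proved, stated in full; the proofs are below) =====
def Claim_equal_counter_subset : Prop := ∀ (list1 : List Int) (list2 : List Int), Dom_counter_subset list1 list2 → Spec_counter_subset list1 list2 (counter_subset list1 list2)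

-- ===== LEMMAS AND PROOFS =====

-- B's loop succeeds iff each element of ys occurs no more often in ys than its budget.
theorem csAltGo_eq_true_iff (ys : List Int) (d : PySem.Dict Int Int) :
    csAltGo d ys = true ↔ ∀ t ∈ ys, (ys.count t : Int) ≤ d.getD t 0 := by
  induction ys generalizing d with
  | nil => simp [csAltGo]
  | cons x xs ih =>
    simp only [csAltGo]
    split
    · rename_i hle
      simp only [Bool.false_eq_true, false_iff]
      intro h
      have := h x (by simp)
      have hc : 0 < (x :: xs).count x := List.count_pos_iff.mpr (by simp)
      omega
    · rename_i hpos
      rw [ih]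
      constructor
      · intro h t ht
        rcases List.mem_cons.mp ht with h1 | h2
        · subst h1
          by_cases hx : t ∈ xs
          · have := h t hx
            simp [PySem.Dict.getD_insert] at this
            simp [List.count_cons]
            omega
          · have : xs.count t = 0 := List.count_eq_zero.mpr hx
            simp [List.count_cons, this]
            omega
        · by_cases hx : t = x
          · subst hx
            have := h t h2
            simp [PySem.Dict.getD_insert] at this
            simp [List.count_cons]
            omega
          · have := h t h2
            simp [PySem.Dict.getD_insert, hx] at this
            simp [List.count_cons, hx]
            omega
      · intro h t ht
        rw [PySem.Dict.getD_insert]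
        by_cases hx : t = x
        · subst hx
          have := h t (by simp)
          simp [List.count_cons] at this ⊢
          omega
        · have := h t (List.mem_cons_of_mem _ ht)
          simp [List.count_cons, hx] at this ⊢
          omega

theorem counter_subset_eq_true_iff (list1 list2 : List Int) :
    counter_subset list1 list2 = true ↔ ∀ t ∈ list2, list2.count t ≤ list1.count t := by
  unfold counter_subset
  simp only [PySem.Dict.items_counter, List.any_map, List.any_eq_true, Function.comp,
    PySem.Dict.getD_counter, PySem.Set.mem_ofList]
  constructor
  · intro h
    split_ifs at h with h1 h2
    push_neg at h2
    intro t ht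
    have := h2 t ht
    simp at this
    exact_mod_cast this
  · intro h
    have h1 : ¬ ∃ k ∈ list1, decide ((list1.count k : Int) < (list2.count k : Int)) = true := by
      rintro ⟨k, hk, hlt⟩
      simp at hlt
      by_cases hm : k ∈ list2
      · have := h k hm; omega
      · have : list2.count k = 0 := List.count_eq_zero.mpr hm
        have hc : 0 < list1.count k := List.count_pos_iff.mpr hk
        omega
    have h2 : ¬ ∃ k ∈ list2, decide ((list2.count k : Int) > (list1.count k : Int)) = true := by
      rintro ⟨k, hk, hlt⟩
      simp at hlt
      have := h k hk; omega
    simp only [gt_iff_lt]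
    rw [if_neg, if_neg]
    · simpa using h2
    · simpa using h1

theorem counter_subset_alt_eq_true_iff (list1 list2 : List Int) :
    counter_subset_alt list1 list2 = true ↔ ∀ t ∈ list2, list2.count t ≤ list1.count t := by
  unfold counter_subset_alt
  rw [csAltGo_eq_true_iff]
  simp only [PySem.Dict.getD_counter]
  constructor <;> intro h t ht <;> have := h t ht <;> exact_mod_cast this

-- ===== VERDICT (by name: the statement is the Claim_ definition above) =====
theorem counter_subset_spec : Claim_equal_counter_subset := by
  intro list1 list2 _
  unfold Spec_counter_subset
  rw [Bool.eq_iff_iff, counter_subset_eq_true_iff, counter_subset_alt_eq_true_iff]
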